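-- pv_equiv track=rewrite | github.com/data-centric-ai/dcbench | dcbench/tasks/budgetclean/cpclean/algorithm/sort_count.py | group_by_classes
-- ===== SOURCE A (Python) =====
-- def group_by_classes(S, y):
--     classes = [0, 1]
--
--     # map old row number to new row number in each group
--     new_rid = {}
--
--     # number of rows in each group
--     N_c = {c:0 for c in classes}
--
--     # number of candidates for each row
--     row_count = {c:[] for c in classes}
--
--     # initialze alpha beta counters grouped by classes
--     alpha_beta_c = {c:[] for c in classes}
--
--     for ri, (Si, yi) in enumerate(zip(S, y)):
--         new_rid[ri] = len(alpha_beta_c[yi]) #new row number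
--         row_count[yi].append(len(Si))
--         alpha_beta_c[yi].append([0, 1])
--         N_c[yi] += 1
--
--     n_must_alpha_c = {c:0 for c in classes}
--     n_must_beta_c = {c:N_c[c] for c in classes}
--     return alpha_beta_c, new_rid, classes, N_c, row_count, n_must_alpha_c, n_must_beta_c
-- ===== SOURCE B (Python) =====
-- def group_by_classes(S, y):
--     classes = [0, 1]
--     rows = list(zip(S, y))
--     labels = [yi for _, yi in rows]
--     N_c = {c: labels.count(c) for c in classes}
--     row_count = {c: [len(Si) for Si, yi in rows if yi == c] for c in classes}
--     alpha_beta_c = {c: [[0, 1] for _ in range(N_c[c])] for c in classes}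
--     new_rid = {ri: labels[:ri].count(yi) for ri, yi in enumerate(labels)}
--     n_must_alpha_c = {c: 0 for c in classes}
--     n_must_beta_c = dict(N_c)
--     return alpha_beta_c, new_rid, classes, N_c, row_count, n_must_alpha_c, n_must_beta_c
-- ===== Notes on version B (the rewrite author's own statement) =====
-- stated objective: simpler
-- what changed: A runs one loop that mutates four dicts in lock-step (using the growing alpha_beta list's length as the next row id); B derives each output independently from the zipped rows with counts, filters and prefix counts, with no mutable dict state.
import Mathlib
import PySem

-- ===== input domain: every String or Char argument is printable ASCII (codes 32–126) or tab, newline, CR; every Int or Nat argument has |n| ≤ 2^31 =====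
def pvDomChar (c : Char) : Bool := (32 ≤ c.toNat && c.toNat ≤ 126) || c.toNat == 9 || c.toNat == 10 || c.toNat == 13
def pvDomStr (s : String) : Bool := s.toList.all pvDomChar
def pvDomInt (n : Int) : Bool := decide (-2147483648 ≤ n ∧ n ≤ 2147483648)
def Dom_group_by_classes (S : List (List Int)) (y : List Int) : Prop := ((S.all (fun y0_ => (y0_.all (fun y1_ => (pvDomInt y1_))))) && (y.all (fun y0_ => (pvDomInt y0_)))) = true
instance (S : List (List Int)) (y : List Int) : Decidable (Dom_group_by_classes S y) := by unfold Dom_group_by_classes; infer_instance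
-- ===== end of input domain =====

-- B replaces A's single loop that mutates four dicts in lock-step by independent
-- per-component derivations (counts, filters, prefix counts): objective 'simpler'.

-- ===== PORT A =====
-- loop state: (new_rid, row_count, alpha_beta_c, N_c)
def pvStateA : Type :=
  PySem.Dict Int Int × PySem.Dict Int (List Int) × PySem.Dict Int (List (List Int)) × PySem.Dict Int Int

-- one iteration of A's for-loop body, in Python's order of reads and writes;
-- Python's d[yi] (KeyError for labels outside {0,1}, excluded by Pre_) is totalized with getD.
def pvStepA (st : pvStateA) (p : Int × (List Int × Int)) : pvStateA :=
  (st.1.insert p.1 ((st.2.2.1.getD p.2.2 []).length : Int),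
   st.2.1.insert p.2.2 ((st.2.1.getD p.2.2 []) ++ [(p.2.1.length : Int)]),
   st.2.2.1.insert p.2.2 ((st.2.2.1.getD p.2.2 []) ++ [[0, 1]]),
   st.2.2.2.insert p.2.2 (st.2.2.2.getD p.2.2 0 + 1))

def group_by_classes (S : List (List Int)) (y : List Int) : (List (Int × List (List Int))) × (List (Int × Int)) × List Int × (List (Int × Int)) × (List (Int × List Int)) × (List (Int × Int)) × (List (Int × Int)) :=
  let classes : List Int := [0, 1]
  let new_rid : PySem.Dict Int Int := PySem.Dict.empty
  let N_c : PySem.Dict Int Int := classes.foldl (fun d c => d.insert c 0) PySem.Dict.empty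
  let row_count : PySem.Dict Int (List Int) := classes.foldl (fun d c => d.insert c []) PySem.Dict.empty
  let alpha_beta_c : PySem.Dict Int (List (List Int)) := classes.foldl (fun d c => d.insert c []) PySem.Dict.empty
  let st := (PySem.List.enumerate (S.zip y)).foldl pvStepA (new_rid, row_count, alpha_beta_c, N_c)
  let n_must_alpha_c : PySem.Dict Int Int := classes.foldl (fun d c => d.insert c 0) PySem.Dict.empty
  let n_must_beta_c : PySem.Dict Int Int := classes.foldl (fun d c => d.insert c (st.2.2.2.getD c 0)) PySem.Dict.empty
  (st.2.2.1.items, st.1.items, classes, st.2.2.2.items, st.2.1.items, n_must_alpha_c.items, n_must_beta_c.items)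

-- ===== PORT B =====
def group_by_classes_alt (S : List (List Int)) (y : List Int) : (List (Int × List (List Int))) × (List (Int × Int)) × List Int × (List (Int × Int)) × (List (Int × List Int)) × (List (Int × Int)) × (List (Int × Int)) :=
  let classes : List Int := [0, 1]
  let rows := S.zip y
  let labels := rows.map (·.2)
  let N_c := classes.map (fun c => (c, (labels.count c : Int)))
  let row_count := classes.map (fun c => (c, (rows.filter (fun p => p.2 == c)).map (fun p => (p.1.length : Int))))
  let alpha_beta_c := classes.map (fun c => (c, List.replicate (labels.count c) ([0, 1] : List Int)))
  -- labels[:ri] with ri = the (nonnegative) enumerate index: take is exact here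
  let new_rid := (PySem.List.enumerate labels).map (fun p => (p.1, ((labels.take p.1.toNat).count p.2 : Int)))
  let n_must_alpha_c := classes.map (fun c => (c, (0 : Int)))
  let n_must_beta_c := N_c
  (alpha_beta_c, new_rid, classes, N_c, row_count, n_must_alpha_c, n_must_beta_c)

-- ===== PRECONDITION & SPEC =====
-- Pre_ excludes inputs where some paired label is outside {0, 1}: there Python A
-- raises KeyError (alpha_beta_c[yi]).
def Pre_group_by_classes (S : List (List Int)) (y : List Int) : Prop :=
  ∀ p ∈ S.zip y, p.2 = 0 ∨ p.2 = 1
instance (S : List (List Int)) (y : List Int) : Decidable (Pre_group_by_classes S y) := by unfold Pre_group_by_classes; infer_instance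

def pvWitness_group_by_classes : List (List Int) × List Int := ([[5], [], [7, 8]], [1, 0, 1])

def Spec_group_by_classes (S : List (List Int)) (y : List Int) (out : (List (Int × List (List Int))) × (List (Int × Int)) × List Int × (List (Int × Int)) × (List (Int × List Int)) × (List (Int × Int)) × (List (Int × Int))) : Prop := out = group_by_classes_alt S y
instance (S : List (List Int)) (y : List Int) (out : (List (Int × List (List Int))) × (List (Int × Int)) × List Int × (List (Int × Int)) × (List (Int × List Int)) × (List (Int × Int)) × (List (Int × Int))) : Decidable (Spec_group_by_classes S y out) := by
  unfold Spec_group_by_classes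
  haveI : DecidableEq ((List (Int × List Int)) × (List (Int × Int)) × (List (Int × Int))) := inferInstance
  haveI : DecidableEq ((List (Int × Int)) × (List (Int × List Int)) × (List (Int × Int)) × (List (Int × Int))) := inferInstance
  haveI : DecidableEq (List Int × (List (Int × Int)) × (List (Int × List Int)) × (List (Int × Int)) × (List (Int × Int))) := inferInstance
  haveI : DecidableEq ((List (Int × Int)) × List Int × (List (Int × Int)) × (List (Int × List Int)) × (List (Int × Int)) × (List (Int × Int))) := inferInstance
  infer_instance

-- ===== CLAIM (what is proved, stated in full; the proofs are below) =====
def Claim_equal_group_by_classes : Prop := ∀ (S : List (List Int)) (y : List Int), Dom_group_by_classes S y → Pre_group_by_classes S y → Spec_group_by_classes S y (group_by_classes S y)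

-- ===== LEMMAS AND PROOFS =====

-- explicit form of A's new_rid after the loop over the zipped rows
def pvRidOf (rows : List (List Int × Int)) : List (Int × Int) :=
  (PySem.List.enumerate (rows.map (·.2))).map
    (fun p => (p.1, (((rows.map (·.2)).take p.1.toNat).count p.2 : Int)))

-- explicit form of A's whole loop state after the loop over the zipped rows
def pvFinal (rows : List (List Int × Int)) : pvStateA :=
  (PySem.Dict.mk (pvRidOf rows),
   PySem.Dict.mk [(0, (rows.filter (fun p => p.2 == 0)).map (fun p => (p.1.length : Int))),
                  (1, (rows.filter (fun p => p.2 == 1)).map (fun p => (p.1.length : Int)))],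
   PySem.Dict.mk [(0, List.replicate ((rows.map (·.2)).count 0) ([0, 1] : List Int)),
                  (1, List.replicate ((rows.map (·.2)).count 1) ([0, 1] : List Int))],
   PySem.Dict.mk [(0, ((rows.map (·.2)).count 0 : Int)), (1, ((rows.map (·.2)).count 1 : Int))])

theorem pvRidOf_append (xs : List (List Int × Int)) (x : List Int × Int) :
    pvRidOf (xs ++ [x]) = pvRidOf xs ++ [((xs.length : Int), ((xs.map (·.2)).count x.2 : Int))] := by
  simp only [pvRidOf, List.map_append, PySem.List.enumerate_append]
  congr 1
  · apply List.map_congr_left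
    intro p hp
    rcases (PySem.List.mem_enumerate_iff _ _ _).mp hp with ⟨k, hk, rfl⟩
    have ht : (((0:Int) + k).toNat) ≤ (xs.map (·.2)).length := by simp at hk ⊢; omega
    rw [List.take_append_of_le_length ht]
  · simp [PySem.List.enumerate_cons, PySem.List.enumerate_nil, List.take_left']

theorem pvRid_not_contains (xs : List (List Int × Int)) :
    (PySem.Dict.mk (pvRidOf xs)).contains ((xs.length : Int)) = false := by
  rw [← Bool.not_eq_true, PySem.Dict.contains_iff_mem_keys]
  simp only [PySem.Dict.keys_mk, pvRidOf, List.map_map]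
  intro hmem
  have : ((xs.length : Int)) ∈ (PySem.List.enumerate (xs.map (·.2)) 0).map (·.1) := by
    simpa [Function.comp] using hmem
  rw [PySem.List.map_fst_enumerate] at this
  have := (PySem.List.mem_pyRange_one.mp this)
  simp at this

theorem pvRid_insert (xs : List (List Int × Int)) (w : Int) :
    (PySem.Dict.mk (pvRidOf xs)).insert ((xs.length : Int)) w
      = PySem.Dict.mk (pvRidOf xs ++ [((xs.length : Int), w)]) := by
  apply PySem.Dict.ext
  rw [PySem.Dict.items_insert, pvRid_not_contains]
  simp

theorem pvDict2_insert_0 {ν : Type} (v0 v1 w : ν) :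
    (PySem.Dict.mk [((0:Int), v0), (1, v1)]).insert 0 w = PySem.Dict.mk [(0, w), (1, v1)] := by
  apply PySem.Dict.ext; simp [PySem.Dict.items_insert]

theorem pvDict2_insert_1 {ν : Type} (v0 v1 w : ν) :
    (PySem.Dict.mk [((0:Int), v0), (1, v1)]).insert 1 w = PySem.Dict.mk [(0, v0), (1, w)] := by
  apply PySem.Dict.ext; simp [PySem.Dict.items_insert]

theorem pvDict2_getD_0 {ν : Type} (v0 v1 d : ν) :
    (PySem.Dict.mk [((0:Int), v0), (1, v1)]).getD 0 d = v0 := by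
  simp [PySem.Dict.getD, PySem.Dict.get?_mk_cons]

theorem pvDict2_getD_1 {ν : Type} (v0 v1 d : ν) :
    (PySem.Dict.mk [((0:Int), v0), (1, v1)]).getD 1 d = v1 := by
  simp [PySem.Dict.getD, PySem.Dict.get?_mk_cons]

theorem pvDict_build2 {ν : Type} (a b : ν) :
    (((PySem.Dict.empty : PySem.Dict Int ν).insert 0 a).insert 1 b).items = [(0, a), (1, b)] := by
  simp [PySem.Dict.items_insert, PySem.Dict.contains_insert, PySem.Dict.empty]

theorem pvStep_final (xs : List (List Int × Int)) (x : List Int × Int)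
    (hx : x.2 = 0 ∨ x.2 = 1) :
    pvStepA (pvFinal xs) ((xs.length : Int), x) = pvFinal (xs ++ [x]) := by
  obtain ⟨S1, c⟩ := x
  rcases hx with hc | hc <;> (simp only at hc; subst hc) <;>
    simp [pvStepA, pvFinal, pvRidOf_append, pvRid_insert,
      pvDict2_insert_0, pvDict2_insert_1, pvDict2_getD_0, pvDict2_getD_1,
      List.count_append, List.replicate_succ', List.filter_append]

theorem pvLoopA (rows : List (List Int × Int)) (h : ∀ p ∈ rows, p.2 = 0 ∨ p.2 = 1) :
    (PySem.List.enumerate rows).foldl pvStepA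
      (PySem.Dict.empty, PySem.Dict.mk [(0, []), (1, [])],
       PySem.Dict.mk [(0, []), (1, [])], PySem.Dict.mk [(0, 0), (1, 0)])
    = pvFinal rows := by
  induction rows using List.reverseRecOn with
  | nil => rfl
  | append_singleton xs x ih =>
    rw [PySem.List.enumerate_append, List.foldl_append,
      ih (fun p hp => h p (List.mem_append_left _ hp))]
    have : PySem.List.enumerate [x] ((0:Int) + xs.length) = [((xs.length : Int), x)] := by
      simp [PySem.List.enumerate_cons, PySem.List.enumerate_nil]
    rw [this]
    simpa using pvStep_final xs x (h x (List.mem_append_right _ (List.mem_singleton.mpr rfl)))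

-- ===== VERDICT (by name: the statement is the Claim_ definition above) =====
theorem group_by_classes_spec : Claim_equal_group_by_classes := by
  intro S y _ hpre
  unfold Spec_group_by_classes
  simp only [group_by_classes, group_by_classes_alt]
  have hinit : (List.foldl (fun d c => d.insert c (0:Int)) PySem.Dict.empty [(0:Int), 1])
      = PySem.Dict.mk [(0, 0), (1, 0)] := rfl
  rw [show ((([0,1] : List Int).foldl (fun d c => d.insert c ([] : List Int)) PySem.Dict.empty))
      = PySem.Dict.mk [(0, []), (1, [])] from rfl]
  rw [show ((([0,1] : List Int).foldl (fun d c => d.insert c ([] : List (List Int))) PySem.Dict.empty))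
      = PySem.Dict.mk [(0, []), (1, [])] from rfl]
  rw [hinit, pvLoopA (S.zip y) hpre]
  simp [pvFinal, pvRidOf, pvDict2_getD_0, pvDict2_getD_1, pvDict_build2]
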